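-- pv_equiv track=rewrite | github.com/livcristi/Advent-Of-Code | AdventOfCode2024/Advent/Day7/day7.py | get_operators_from_hash_add_mult_conc
-- ===== SOURCE A (Python) =====
-- def get_operators_from_hash_add_mult_conc(operator_hash: int, length: int) -> list[str]:
--     operators = []
--     while operator_hash > 0:
--         if operator_hash % 3 == 0:
--             operators.append("+")
--         elif operator_hash % 3 == 1:
--             operators.append("*")
--         else:
--             operators.append("||")
--         operator_hash //= 3
--     operators.extend("+" * (length - len(operators)))
--     return operators
-- ===== SOURCE B (Python) =====
-- def get_operators_from_hash_add_mult_conc(operator_hash: int, length: int) -> list[str]: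
--     if operator_hash <= 0:
--         return ["+"] * length
--     num = 0
--     power = 1
--     while power <= operator_hash:
--         num += 1
--         power *= 3
--     total = max(length, num)
--     # position i holds the i-th base-3 digit of the hash; digits past num are all 0, i.e. '+'
--     return [("+", "*", "||")[(operator_hash // 3 ** i) % 3] if i < num else "+"
--             for i in range(total)]
-- ===== Notes on version B (the rewrite author's own statement) =====
-- stated objective: alternative
-- what changed: Replaces A's destructive divide-and-append loop followed by a separate '+'-padding extend with a base-3 digit count plus one uniform positional pass that reads digit i as (hash // 3**i) % 3, producing digits and padding in the same comprehension.
import Mathlib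
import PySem

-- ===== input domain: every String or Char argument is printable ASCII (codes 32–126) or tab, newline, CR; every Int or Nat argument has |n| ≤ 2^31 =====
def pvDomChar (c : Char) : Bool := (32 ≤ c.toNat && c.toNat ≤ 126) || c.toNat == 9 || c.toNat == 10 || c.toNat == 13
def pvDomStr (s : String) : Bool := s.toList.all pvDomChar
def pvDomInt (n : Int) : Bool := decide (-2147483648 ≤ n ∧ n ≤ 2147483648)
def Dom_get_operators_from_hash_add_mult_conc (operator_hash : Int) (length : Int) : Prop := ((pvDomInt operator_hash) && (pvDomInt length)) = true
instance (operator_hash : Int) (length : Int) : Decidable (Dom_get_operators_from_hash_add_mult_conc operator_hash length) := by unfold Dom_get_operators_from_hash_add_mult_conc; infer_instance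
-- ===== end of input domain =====

-- B replaces A's destructive divide-and-append loop plus separate '+'-padding step by a digit
-- count and one uniform positional pass (entry i = i-th base-3 digit; digit 0 beyond the real
-- digits yields the '+' padding for free); objective: alternative decomposition, not speed.

-- ===== PORT A =====
-- A's while loop: peel base-3 digits off operator_hash destructively.
def pvA_digits (h : Int) : List String :=
  if _hp : 0 < h then
    (if PySem.Int.mod h 3 = 0 then "+"
     else if PySem.Int.mod h 3 = 1 then "*"
     else "||") :: pvA_digits (PySem.Int.floordiv h 3)
  else []
  termination_by h.toNat
  decreasing_by
    rw [PySem.Int.floordiv_eq_ediv_of_pos (by norm_num)]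
    omega

def get_operators_from_hash_add_mult_conc (operator_hash : Int) (length : Int) : List String :=
  let operators := pvA_digits operator_hash
  operators ++ List.replicate (length - (operators.length : Int)).toNat "+"

-- ===== PORT B =====
-- B's while loop: count the base-3 digits of h (power = 3^n carried as the exponent n).
def pvB_numDigits (h : Int) (n : Nat) : Nat :=
  if (3 : Int) ^ n ≤ h then pvB_numDigits h (n + 1) else n
  termination_by (h + 1 - 3 ^ n).toNat
  decreasing_by
    have _h1 : (0 : Int) < 3 ^ n := by positivity
    have _h2 : (3 : Int) ^ (n + 1) = 3 ^ n * 3 := pow_succ 3 n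
    omega

def get_operators_from_hash_add_mult_conc_alt (operator_hash : Int) (length : Int) : List String :=
  if operator_hash ≤ 0 then List.replicate length.toNat "+"
  else
    let num : Int := pvB_numDigits operator_hash 0
    let total := max length num
    (PySem.List.pyRange 0 total 1).map (fun i =>
      if i < num then
        ["+", "*", "||"].getD (PySem.Int.mod (PySem.Int.floordiv operator_hash ((3 : Int) ^ i.toNat)) 3).toNat "+"
      else "+")

-- ===== PRECONDITION & SPEC =====
def Spec_get_operators_from_hash_add_mult_conc (operator_hash : Int) (length : Int) (out : List String) : Prop := out = get_operators_from_hash_add_mult_conc_alt operator_hash length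
instance (operator_hash : Int) (length : Int) (out : List String) : Decidable (Spec_get_operators_from_hash_add_mult_conc operator_hash length out) := by unfold Spec_get_operators_from_hash_add_mult_conc; infer_instance

-- ===== CLAIM (what is proved, stated in full; the proofs are below) =====
def Claim_equal_get_operators_from_hash_add_mult_conc : Prop := ∀ (operator_hash : Int) (length : Int), Dom_get_operators_from_hash_add_mult_conc operator_hash length → Spec_get_operators_from_hash_add_mult_conc operator_hash length (get_operators_from_hash_add_mult_conc operator_hash length)

-- ===== LEMMAS AND PROOFS =====

-- pvB_numDigits h n is the least m ≥ n with h < 3^m.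
lemma pvB_numDigits_spec (h : Int) (n : Nat) :
    h < 3 ^ (pvB_numDigits h n) ∧ n ≤ pvB_numDigits h n ∧
      ∀ m : Nat, n ≤ m → h < 3 ^ m → pvB_numDigits h n ≤ m := by
  fun_induction pvB_numDigits h n with
  | case1 n hle ih =>
    obtain ⟨i1, i2, i3⟩ := ih
    refine ⟨i1, by omega, ?_⟩
    intro m hnm hm
    rcases Nat.eq_or_lt_of_le hnm with rfl | hlt
    · exact absurd hm (by omega)
    · exact i3 m (by omega) hm
  | case2 n hgt =>
    exact ⟨by omega, le_rfl, fun m hnm _ => hnm⟩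

-- step: the digit count of h is one more than that of h // 3, for positive h
lemma pvB_numDigits_step (h : Int) (hp : 0 < h) :
    pvB_numDigits h 0 = pvB_numDigits (PySem.Int.floordiv h 3) 0 + 1 := by
  rw [PySem.Int.floordiv_eq_ediv_of_pos (by norm_num)]
  obtain ⟨a1, _, a3⟩ := pvB_numDigits_spec h 0
  obtain ⟨b1, _, b3⟩ := pvB_numDigits_spec (h / 3) 0
  set d := pvB_numDigits h 0 with hd
  set e := pvB_numDigits (h / 3) 0 with he
  have hd1 : 1 ≤ d := by
    by_contra hc
    have : d = 0 := by omega
    rw [this] at a1; simp at a1; omega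
  have hde : d ≤ e + 1 := by
    apply a3 _ (by omega)
    have h2 : (3:Int) ^ (e+1) = 3 ^ e * 3 := pow_succ 3 e
    omega
  have hed : e ≤ d - 1 := by
    apply b3 _ (by omega)
    have h2 : (3:Int) ^ ((d-1)+1) = 3 ^ (d-1) * 3 := pow_succ 3 (d-1)
    have : (d - 1) + 1 = d := by omega
    rw [this] at h2
    omega
  omega

lemma pvB_numDigits_zero (h : Int) (hnp : ¬ 0 < h) : pvB_numDigits h 0 = 0 := by
  rw [pvB_numDigits]
  simp only [pow_zero]
  rw [if_neg (by omega)]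

lemma floordiv_floordiv (h : Int) (k : Nat) :
    PySem.Int.floordiv (PySem.Int.floordiv h 3) ((3:Int) ^ k) = PySem.Int.floordiv h ((3:Int) ^ (k+1)) := by
  rw [PySem.Int.floordiv_eq_ediv_of_pos (by norm_num), PySem.Int.floordiv_eq_ediv_of_pos (by positivity),
      PySem.Int.floordiv_eq_ediv_of_pos (by positivity)]
  rw [pow_succ, mul_comm]
  exact Int.ediv_ediv_of_nonneg (by omega)

lemma A_base (h len : Int) (hnp : ¬ 0 < h) :
    get_operators_from_hash_add_mult_conc h len = List.replicate len.toNat "+" := by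
  unfold get_operators_from_hash_add_mult_conc
  rw [pvA_digits, dif_neg hnp]
  simp

lemma A_cons (h len : Int) (hp : 0 < h) :
    get_operators_from_hash_add_mult_conc h len =
      (if PySem.Int.mod h 3 = 0 then "+" else if PySem.Int.mod h 3 = 1 then "*" else "||") ::
        get_operators_from_hash_add_mult_conc (PySem.Int.floordiv h 3) (len - 1) := by
  unfold get_operators_from_hash_add_mult_conc
  rw [pvA_digits, dif_pos hp]
  simp only [List.length_cons, List.cons_append]
  congr 2
  congr 1
  push_cast
  omega

lemma B_base (h len : Int) (hnp : ¬ 0 < h) :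
    get_operators_from_hash_add_mult_conc_alt h len = List.replicate len.toNat "+" := by
  unfold get_operators_from_hash_add_mult_conc_alt
  rw [if_pos (by omega : h ≤ 0)]

lemma getD_op (r : Int) (h0 : 0 ≤ r) (h3 : r < 3) :
    ["+", "*", "||"].getD r.toNat "+" = (if r = 0 then "+" else if r = 1 then "*" else "||") := by
  have : r = 0 ∨ r = 1 ∨ r = 2 := by omega
  rcases this with rfl | rfl | rfl <;> rfl

lemma B_cons (h len : Int) (hp : 0 < h) :
    get_operators_from_hash_add_mult_conc_alt h len =
      (if PySem.Int.mod h 3 = 0 then "+" else if PySem.Int.mod h 3 = 1 then "*" else "||") ::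
        get_operators_from_hash_add_mult_conc_alt (PySem.Int.floordiv h 3) (len - 1) := by
  have hstep := pvB_numDigits_step h hp
  unfold get_operators_from_hash_add_mult_conc_alt
  rw [if_neg (by omega : ¬ h ≤ 0)]
  simp only
  set e : Nat := pvB_numDigits (PySem.Int.floordiv h 3) 0 with he
  rw [hstep]
  have hcast : ((e + 1 : Nat) : Int) = (e : Int) + 1 := by push_cast; ring
  have htotpos : (0:Int) < max len ((e:Nat) + 1 : Nat) := by
    rw [hcast]; omega
  rw [PySem.List.pyRange_one_cons htotpos, List.map_cons]
  congr 1
  · -- head element: i = 0 < num, 3^0 = 1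
    rw [if_pos (by rw [hcast]; omega : (0:Int) < ((e + 1 : Nat) : Int))]
    have h1 : PySem.Int.floordiv h ((3:Int) ^ (0:Int).toNat) = h := by
      rw [PySem.Int.floordiv_eq_ediv_of_pos (by norm_num)]
      simp
    rw [h1]
    exact getD_op _ (PySem.Int.mod_nonneg h (by norm_num)) (PySem.Int.mod_lt h (by norm_num))
  · -- tail: the digits of h // 3, shifted one position
    by_cases hp' : 0 < PySem.Int.floordiv h 3
    · rw [if_neg (by omega : ¬ PySem.Int.floordiv h 3 ≤ 0)]
      have htot : max len ((e + 1 : Nat) : Int) = max (len - 1) ((e : Nat) : Int) + 1 := by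
        rw [hcast]; omega
      rw [htot]
      rw [PySem.List.pyRange_one, PySem.List.pyRange_one, List.map_map, List.map_map]
      have hn : (max (len - 1) ((e : Nat) : Int) + 1 - (0 + 1)).toNat = (max (len - 1) ((e : Nat) : Int) - 0).toNat := by omega
      rw [hn]
      apply List.map_congr_left
      intro k _
      simp only [Function.comp_apply]
      have h1 : ((0 : Int) + 1 + k).toNat = k + 1 := by omega
      have h2 : ((0 : Int) + k).toNat = k := by omega
      rw [h1, h2, ← floordiv_floordiv h]
      by_cases hk : ((0 : Int) + k < (e : Int))
      · rw [if_pos (by rw [hcast]; omega : (0:Int) + 1 + k < ((e + 1 : Nat) : Int)), if_pos hk]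
      · rw [if_neg (by rw [hcast]; omega : ¬ (0:Int) + 1 + k < ((e + 1 : Nat) : Int)), if_neg hk]
    · -- h // 3 = 0: num = 1, so every tail position is padding
      have he0 : e = 0 := pvB_numDigits_zero _ hp'
      rw [if_pos (by omega : PySem.Int.floordiv h 3 ≤ 0)]
      rw [he0]
      apply List.eq_replicate_iff.mpr
      constructor
      · rw [List.length_map, PySem.List.length_pyRange_one]
        have hdiv := PySem.Int.floordiv_eq_ediv_of_pos (a := h) (b := 3) (by norm_num)
        omega
      · intro x hx
        rw [List.mem_map] at hx
        obtain ⟨i, hi, rfl⟩ := hx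
        rw [PySem.List.mem_pyRange_one] at hi
        rw [if_neg (by push_cast; omega : ¬ i < ((0 + 1 : Nat) : Int))]

lemma main_aux : ∀ n : Nat, ∀ h len : Int, h.toNat ≤ n →
    get_operators_from_hash_add_mult_conc h len = get_operators_from_hash_add_mult_conc_alt h len := by
  intro n
  induction n with
  | zero =>
    intro h len hle
    have hnp : ¬ 0 < h := by omega
    rw [A_base h len hnp, B_base h len hnp]
  | succ n ih =>
    intro h len hle
    by_cases hp : 0 < h
    · rw [A_cons h len hp, B_cons h len hp]
      congr 1
      apply ih
      have := PySem.Int.floordiv_eq_ediv_of_pos (a := h) (b := 3) (by norm_num)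
      omega
    · rw [A_base h len hp, B_base h len hp]

-- ===== VERDICT (by name: the statement is the Claim_ definition above) =====
theorem get_operators_from_hash_add_mult_conc_spec : Claim_equal_get_operators_from_hash_add_mult_conc := by
  intro h len _
  unfold Spec_get_operators_from_hash_add_mult_conc
  exact main_aux h.toNat h len le_rfl
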